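-- pv_equiv track=rewrite | github.com/donnafarris/aso_eda | src/model_data_wrangling.py | get_harvard_designation_number
-- ===== SOURCE A (Python) =====
-- def get_harvard_designation_number(harvard_designation):
--     """
--     Get the number corresponding to a Harvard designation.
--
--     Args:
--         harvard_designation (str): The Harvard designation.
--
--     Returns:
--         int: The corresponding number.
--     """
--     harvard_designation_order = {
--         1: 'ALP', 2: 'BET', 3: 'GAM', 4: 'DEL', 5: 'EPS', 6: 'ZET', 7: 'ETA', 8: 'THE', 9: 'IOT', 10: 'KAP',
--         11: 'LAM', 12: 'MU', 13: 'NU', 14: 'XI', 15: 'OMI', 16: 'PI', 17: 'RHO', 18: 'SIG', 19: 'TAU', 20: 'UPS',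
--         21: 'PHI', 22: 'CHI', 23: 'PSI', 24: 'OME', 25: 'A ALP', 26: 'A BET', 27: 'A GAM', 28: 'A DEL', 29: 'A EPS', 30: 'A ZET',
--         31: 'A ETA', 32: 'A THE', 33: 'A IOT', 34: 'A KAP', 35: 'A LAM', 36: 'A MU', 37: 'A NU', 38: 'A XI', 39: 'A OMI', 40: 'A PI',
--         41: 'A RHO', 42: 'A SIG', 43: 'A TAU', 44: 'A UPS', 45: 'A PHI', 46: 'A CHI', 47: 'A PSI', 48: 'A OME', 49: 'B ALP', 50: 'B BET',
--         51: 'B GAM', 52: 'B DEL', 53: 'B EPS', 54: 'B ZET', 55: 'B ETA', 56: 'B THE', 57: 'B IOT', 58: 'B KAP', 59: 'B LAM', 60: 'B MU',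
--         61: 'B NU', 62: 'B XI', 63: 'B OMI', 64: 'B PI', 65: 'B RHO', 66: 'B SIG', 67: 'B TAU', 68: 'B UPS', 69: 'B PHI', 70: 'B CHI',
--         71: 'B PSI', 72: 'B OME'
--     }
--     return {v: k for k, v in harvard_designation_order.items()}.get(harvard_designation)
-- ===== SOURCE B (Python) =====
-- GREEK = ['ALP', 'BET', 'GAM', 'DEL', 'EPS', 'ZET', 'ETA', 'THE', 'IOT', 'KAP',
--          'LAM', 'MU', 'NU', 'XI', 'OMI', 'PI', 'RHO', 'SIG', 'TAU', 'UPS',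
--          'PHI', 'CHI', 'PSI', 'OME']
--
--
-- def get_harvard_designation_number(harvard_designation):
--     """Parse the designation as [prefix] + Greek abbreviation instead of a 72-entry table."""
--     if harvard_designation.startswith('A '):
--         offset, name = 24, harvard_designation[2:]
--     elif harvard_designation.startswith('B '):
--         offset, name = 48, harvard_designation[2:]
--     else:
--         offset, name = 0, harvard_designation
--     if name in GREEK:
--         return offset + GREEK.index(name) + 1
--     return None
-- ===== Notes on version B (the rewrite author's own statement) =====
-- stated objective: simpler
-- what changed: Instead of building a 72-entry dict and reversing it per call, B splits off an optional 'A '/'B ' prefix (offset 24/48) and indexes the remaining Greek abbreviation in a 24-entry list, returning offset + index + 1.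
import Mathlib
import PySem

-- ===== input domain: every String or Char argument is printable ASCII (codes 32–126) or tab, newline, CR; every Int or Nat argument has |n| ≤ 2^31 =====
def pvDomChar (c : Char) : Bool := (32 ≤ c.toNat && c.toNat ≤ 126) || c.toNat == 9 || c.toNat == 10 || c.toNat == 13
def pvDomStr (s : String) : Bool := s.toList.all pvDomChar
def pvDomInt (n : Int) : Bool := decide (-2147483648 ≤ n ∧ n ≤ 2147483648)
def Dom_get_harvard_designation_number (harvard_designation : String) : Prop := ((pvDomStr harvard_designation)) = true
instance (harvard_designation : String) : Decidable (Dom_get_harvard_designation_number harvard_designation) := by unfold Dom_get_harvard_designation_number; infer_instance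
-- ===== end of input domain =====

-- B replaces A's per-call 72-entry reversed-dict lookup by parsing the designation into
-- an optional 'A '/'B ' prefix (offset 24/48) plus an index into a 24-entry Greek list
-- (objective: simpler; strings are handled as their char lists, as PySem prescribes).

-- ===== PORT A =====
def get_harvard_designation_number (harvard_designation : String) : Option Int :=
  let harvard_designation_order : PySem.Dict Int (List Char) := PySem.Dict.ofList
    [(1, ['A', 'L', 'P']),
     (2, ['B', 'E', 'T']),
     (3, ['G', 'A', 'M']),
     (4, ['D', 'E', 'L']),
     (5, ['E', 'P', 'S']),
     (6, ['Z', 'E', 'T']),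
     (7, ['E', 'T', 'A']),
     (8, ['T', 'H', 'E']),
     (9, ['I', 'O', 'T']),
     (10, ['K', 'A', 'P']),
     (11, ['L', 'A', 'M']),
     (12, ['M', 'U']),
     (13, ['N', 'U']),
     (14, ['X', 'I']),
     (15, ['O', 'M', 'I']),
     (16, ['P', 'I']),
     (17, ['R', 'H', 'O']),
     (18, ['S', 'I', 'G']),
     (19, ['T', 'A', 'U']),
     (20, ['U', 'P', 'S']),
     (21, ['P', 'H', 'I']),
     (22, ['C', 'H', 'I']),
     (23, ['P', 'S', 'I']),
     (24, ['O', 'M', 'E']),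
     (25, ['A', ' ', 'A', 'L', 'P']),
     (26, ['A', ' ', 'B', 'E', 'T']),
     (27, ['A', ' ', 'G', 'A', 'M']),
     (28, ['A', ' ', 'D', 'E', 'L']),
     (29, ['A', ' ', 'E', 'P', 'S']),
     (30, ['A', ' ', 'Z', 'E', 'T']),
     (31, ['A', ' ', 'E', 'T', 'A']),
     (32, ['A', ' ', 'T', 'H', 'E']),
     (33, ['A', ' ', 'I', 'O', 'T']),
     (34, ['A', ' ', 'K', 'A', 'P']),
     (35, ['A', ' ', 'L', 'A', 'M']),
     (36, ['A', ' ', 'M', 'U']),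
     (37, ['A', ' ', 'N', 'U']),
     (38, ['A', ' ', 'X', 'I']),
     (39, ['A', ' ', 'O', 'M', 'I']),
     (40, ['A', ' ', 'P', 'I']),
     (41, ['A', ' ', 'R', 'H', 'O']),
     (42, ['A', ' ', 'S', 'I', 'G']),
     (43, ['A', ' ', 'T', 'A', 'U']),
     (44, ['A', ' ', 'U', 'P', 'S']),
     (45, ['A', ' ', 'P', 'H', 'I']),
     (46, ['A', ' ', 'C', 'H', 'I']),
     (47, ['A', ' ', 'P', 'S', 'I']),
     (48, ['A', ' ', 'O', 'M', 'E']),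
     (49, ['B', ' ', 'A', 'L', 'P']),
     (50, ['B', ' ', 'B', 'E', 'T']),
     (51, ['B', ' ', 'G', 'A', 'M']),
     (52, ['B', ' ', 'D', 'E', 'L']),
     (53, ['B', ' ', 'E', 'P', 'S']),
     (54, ['B', ' ', 'Z', 'E', 'T']),
     (55, ['B', ' ', 'E', 'T', 'A']),
     (56, ['B', ' ', 'T', 'H', 'E']),
     (57, ['B', ' ', 'I', 'O', 'T']),
     (58, ['B', ' ', 'K', 'A', 'P']),
     (59, ['B', ' ', 'L', 'A', 'M']),
     (60, ['B', ' ', 'M', 'U']),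
     (61, ['B', ' ', 'N', 'U']),
     (62, ['B', ' ', 'X', 'I']),
     (63, ['B', ' ', 'O', 'M', 'I']),
     (64, ['B', ' ', 'P', 'I']),
     (65, ['B', ' ', 'R', 'H', 'O']),
     (66, ['B', ' ', 'S', 'I', 'G']),
     (67, ['B', ' ', 'T', 'A', 'U']),
     (68, ['B', ' ', 'U', 'P', 'S']),
     (69, ['B', ' ', 'P', 'H', 'I']),
     (70, ['B', ' ', 'C', 'H', 'I']),
     (71, ['B', ' ', 'P', 'S', 'I']),
     (72, ['B', ' ', 'O', 'M', 'E'])]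
  let rev : PySem.Dict (List Char) Int :=
    harvard_designation_order.items.foldl (fun d kv => d.insert kv.2 kv.1) PySem.Dict.empty
  rev.get? harvard_designation.toList

-- ===== PORT B =====
def pvGreek : List (List Char) :=
  [['A', 'L', 'P'],
   ['B', 'E', 'T'],
   ['G', 'A', 'M'],
   ['D', 'E', 'L'],
   ['E', 'P', 'S'],
   ['Z', 'E', 'T'],
   ['E', 'T', 'A'],
   ['T', 'H', 'E'],
   ['I', 'O', 'T'],
   ['K', 'A', 'P'],
   ['L', 'A', 'M'],
   ['M', 'U'],
   ['N', 'U'],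
   ['X', 'I'],
   ['O', 'M', 'I'],
   ['P', 'I'],
   ['R', 'H', 'O'],
   ['S', 'I', 'G'],
   ['T', 'A', 'U'],
   ['U', 'P', 'S'],
   ['P', 'H', 'I'],
   ['C', 'H', 'I'],
   ['P', 'S', 'I'],
   ['O', 'M', 'E']]

def get_harvard_designation_number_alt (harvard_designation : String) : Option Int :=
  -- startswith('A ') / the slice [2:] are done by matching the first two characters
  let p : Int × List Char :=
    match harvard_designation.toList with
    | 'A' :: ' ' :: rest => (24, rest)
    | 'B' :: ' ' :: rest => (48, rest)
    | cs => (0, cs)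
  match PySem.List.index? pvGreek p.2 with
  | some i => some (p.1 + (i : Int) + 1)
  | none => none

-- ===== PRECONDITION & SPEC =====
def Spec_get_harvard_designation_number (harvard_designation : String) (out : Option Int) : Prop := out = get_harvard_designation_number_alt harvard_designation
instance (harvard_designation : String) (out : Option Int) : Decidable (Spec_get_harvard_designation_number harvard_designation out) := by unfold Spec_get_harvard_designation_number; infer_instance

-- ===== CLAIM (what is proved, stated in full; the proofs are below) =====
def Claim_equal_get_harvard_designation_number : Prop := ∀ (harvard_designation : String), Dom_get_harvard_designation_number harvard_designation → Spec_get_harvard_designation_number harvard_designation (get_harvard_designation_number harvard_designation)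

-- ===== LEMMAS AND PROOFS =====

-- the reversed dict A builds, as a literal association list (char-list keys)
def pvRevList : List (List Char × Int) :=
  [(['A', 'L', 'P'], 1),
   (['B', 'E', 'T'], 2),
   (['G', 'A', 'M'], 3),
   (['D', 'E', 'L'], 4),
   (['E', 'P', 'S'], 5),
   (['Z', 'E', 'T'], 6),
   (['E', 'T', 'A'], 7),
   (['T', 'H', 'E'], 8),
   (['I', 'O', 'T'], 9),
   (['K', 'A', 'P'], 10),
   (['L', 'A', 'M'], 11),
   (['M', 'U'], 12),
   (['N', 'U'], 13),
   (['X', 'I'], 14),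
   (['O', 'M', 'I'], 15),
   (['P', 'I'], 16),
   (['R', 'H', 'O'], 17),
   (['S', 'I', 'G'], 18),
   (['T', 'A', 'U'], 19),
   (['U', 'P', 'S'], 20),
   (['P', 'H', 'I'], 21),
   (['C', 'H', 'I'], 22),
   (['P', 'S', 'I'], 23),
   (['O', 'M', 'E'], 24),
   (['A', ' ', 'A', 'L', 'P'], 25),
   (['A', ' ', 'B', 'E', 'T'], 26),
   (['A', ' ', 'G', 'A', 'M'], 27),
   (['A', ' ', 'D', 'E', 'L'], 28),
   (['A', ' ', 'E', 'P', 'S'], 29),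
   (['A', ' ', 'Z', 'E', 'T'], 30),
   (['A', ' ', 'E', 'T', 'A'], 31),
   (['A', ' ', 'T', 'H', 'E'], 32),
   (['A', ' ', 'I', 'O', 'T'], 33),
   (['A', ' ', 'K', 'A', 'P'], 34),
   (['A', ' ', 'L', 'A', 'M'], 35),
   (['A', ' ', 'M', 'U'], 36),
   (['A', ' ', 'N', 'U'], 37),
   (['A', ' ', 'X', 'I'], 38),
   (['A', ' ', 'O', 'M', 'I'], 39),
   (['A', ' ', 'P', 'I'], 40),
   (['A', ' ', 'R', 'H', 'O'], 41),
   (['A', ' ', 'S', 'I', 'G'], 42),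
   (['A', ' ', 'T', 'A', 'U'], 43),
   (['A', ' ', 'U', 'P', 'S'], 44),
   (['A', ' ', 'P', 'H', 'I'], 45),
   (['A', ' ', 'C', 'H', 'I'], 46),
   (['A', ' ', 'P', 'S', 'I'], 47),
   (['A', ' ', 'O', 'M', 'E'], 48),
   (['B', ' ', 'A', 'L', 'P'], 49),
   (['B', ' ', 'B', 'E', 'T'], 50),
   (['B', ' ', 'G', 'A', 'M'], 51),
   (['B', ' ', 'D', 'E', 'L'], 52),
   (['B', ' ', 'E', 'P', 'S'], 53),
   (['B', ' ', 'Z', 'E', 'T'], 54),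
   (['B', ' ', 'E', 'T', 'A'], 55),
   (['B', ' ', 'T', 'H', 'E'], 56),
   (['B', ' ', 'I', 'O', 'T'], 57),
   (['B', ' ', 'K', 'A', 'P'], 58),
   (['B', ' ', 'L', 'A', 'M'], 59),
   (['B', ' ', 'M', 'U'], 60),
   (['B', ' ', 'N', 'U'], 61),
   (['B', ' ', 'X', 'I'], 62),
   (['B', ' ', 'O', 'M', 'I'], 63),
   (['B', ' ', 'P', 'I'], 64),
   (['B', ' ', 'R', 'H', 'O'], 65),
   (['B', ' ', 'S', 'I', 'G'], 66),
   (['B', ' ', 'T', 'A', 'U'], 67),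
   (['B', ' ', 'U', 'P', 'S'], 68),
   (['B', ' ', 'P', 'H', 'I'], 69),
   (['B', ' ', 'C', 'H', 'I'], 70),
   (['B', ' ', 'P', 'S', 'I'], 71),
   (['B', ' ', 'O', 'M', 'E'], 72)]

-- the 72 designations A's reversed dict maps
def pvKeys : List (List Char) :=
  [['A', 'L', 'P'],
   ['B', 'E', 'T'],
   ['G', 'A', 'M'],
   ['D', 'E', 'L'],
   ['E', 'P', 'S'],
   ['Z', 'E', 'T'],
   ['E', 'T', 'A'],
   ['T', 'H', 'E'],
   ['I', 'O', 'T'],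
   ['K', 'A', 'P'],
   ['L', 'A', 'M'],
   ['M', 'U'],
   ['N', 'U'],
   ['X', 'I'],
   ['O', 'M', 'I'],
   ['P', 'I'],
   ['R', 'H', 'O'],
   ['S', 'I', 'G'],
   ['T', 'A', 'U'],
   ['U', 'P', 'S'],
   ['P', 'H', 'I'],
   ['C', 'H', 'I'],
   ['P', 'S', 'I'],
   ['O', 'M', 'E'],
   ['A', ' ', 'A', 'L', 'P'],
   ['A', ' ', 'B', 'E', 'T'],
   ['A', ' ', 'G', 'A', 'M'],
   ['A', ' ', 'D', 'E', 'L'],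
   ['A', ' ', 'E', 'P', 'S'],
   ['A', ' ', 'Z', 'E', 'T'],
   ['A', ' ', 'E', 'T', 'A'],
   ['A', ' ', 'T', 'H', 'E'],
   ['A', ' ', 'I', 'O', 'T'],
   ['A', ' ', 'K', 'A', 'P'],
   ['A', ' ', 'L', 'A', 'M'],
   ['A', ' ', 'M', 'U'],
   ['A', ' ', 'N', 'U'],
   ['A', ' ', 'X', 'I'],
   ['A', ' ', 'O', 'M', 'I'],
   ['A', ' ', 'P', 'I'],
   ['A', ' ', 'R', 'H', 'O'],
   ['A', ' ', 'S', 'I', 'G'],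
   ['A', ' ', 'T', 'A', 'U'],
   ['A', ' ', 'U', 'P', 'S'],
   ['A', ' ', 'P', 'H', 'I'],
   ['A', ' ', 'C', 'H', 'I'],
   ['A', ' ', 'P', 'S', 'I'],
   ['A', ' ', 'O', 'M', 'E'],
   ['B', ' ', 'A', 'L', 'P'],
   ['B', ' ', 'B', 'E', 'T'],
   ['B', ' ', 'G', 'A', 'M'],
   ['B', ' ', 'D', 'E', 'L'],
   ['B', ' ', 'E', 'P', 'S'],
   ['B', ' ', 'Z', 'E', 'T'],
   ['B', ' ', 'E', 'T', 'A'],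
   ['B', ' ', 'T', 'H', 'E'],
   ['B', ' ', 'I', 'O', 'T'],
   ['B', ' ', 'K', 'A', 'P'],
   ['B', ' ', 'L', 'A', 'M'],
   ['B', ' ', 'M', 'U'],
   ['B', ' ', 'N', 'U'],
   ['B', ' ', 'X', 'I'],
   ['B', ' ', 'O', 'M', 'I'],
   ['B', ' ', 'P', 'I'],
   ['B', ' ', 'R', 'H', 'O'],
   ['B', ' ', 'S', 'I', 'G'],
   ['B', ' ', 'T', 'A', 'U'],
   ['B', ' ', 'U', 'P', 'S'],
   ['B', ' ', 'P', 'H', 'I'],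
   ['B', ' ', 'C', 'H', 'I'],
   ['B', ' ', 'P', 'S', 'I'],
   ['B', ' ', 'O', 'M', 'E']]

-- A and B as functions of the char list (each equal to its port by rfl)
def pvACore (cs : List Char) : Option Int := (PySem.Dict.mk pvRevList).get? cs

def pvBCore (cs : List Char) : Option Int :=
  let p : Int × List Char :=
    match cs with
    | 'A' :: ' ' :: rest => (24, rest)
    | 'B' :: ' ' :: rest => (48, rest)
    | cs => (0, cs)
  match PySem.List.index? pvGreek p.2 with
  | some i => some (p.1 + (i : Int) + 1)
  | none => none

set_option maxRecDepth 8192 in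
theorem pvA_eq_core (s : String) :
    get_harvard_designation_number s = pvACore s.toList := rfl

theorem pvB_eq_core (s : String) :
    get_harvard_designation_number_alt s = pvBCore s.toList := rfl

theorem pvA_none (cs : List Char) (h : cs ∉ pvKeys) : pvACore cs = none := by
  unfold pvACore
  rw [PySem.Dict.get?_eq_none_iff_not_mem_keys]
  simpa [pvRevList, PySem.Dict.keys, pvKeys] using h

theorem pvKeys_A : ∀ r ∈ pvGreek, ('A' :: ' ' :: r) ∈ pvKeys := by decide

theorem pvKeys_B : ∀ r ∈ pvGreek, ('B' :: ' ' :: r) ∈ pvKeys := by decide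

theorem pvKeys_bare : ∀ r ∈ pvGreek, r ∈ pvKeys := by decide

theorem pvB_some_mem (cs : List Char) (n : Int)
    (h : pvBCore cs = some n) : cs ∈ pvKeys := by
  unfold pvBCore at h
  split at h
  case h_1 rest =>
    rcases hix : PySem.List.index? pvGreek rest with _ | i
    · simp only [hix] at h; cases h
    · have hm : rest ∈ pvGreek := by
        rw [← PySem.List.index?_isSome_iff, hix]; rfl
      exact pvKeys_A rest hm
  case h_2 rest =>
    rcases hix : PySem.List.index? pvGreek rest with _ | i
    · simp only [hix] at h; cases h
    · have hm : rest ∈ pvGreek := by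
        rw [← PySem.List.index?_isSome_iff, hix]; rfl
      exact pvKeys_B rest hm
  case h_3 h1 h2 =>
    rcases hix : PySem.List.index? pvGreek cs with _ | i
    · simp only [hix] at h; cases h
    · have hm : cs ∈ pvGreek := by
        rw [← PySem.List.index?_isSome_iff, hix]; rfl
      exact pvKeys_bare cs hm

theorem pvEq_on_keys : ∀ cs ∈ pvKeys, pvACore cs = pvBCore cs := by decide

theorem pvCore_eq (cs : List Char) : pvACore cs = pvBCore cs := by
  by_cases h : cs ∈ pvKeys
  · exact pvEq_on_keys cs h
  · rw [pvA_none cs h]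
    rcases hB : pvBCore cs with _ | n
    · rfl
    · exact absurd (pvB_some_mem cs n hB) h

-- ===== VERDICT (by name: the statement is the Claim_ definition above) =====
theorem get_harvard_designation_number_spec : Claim_equal_get_harvard_designation_number := by
  intro s _
  unfold Spec_get_harvard_designation_number
  rw [pvA_eq_core, pvB_eq_core]
  exact pvCore_eq s.toList
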